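-- pv_equiv track=rewrite | github.com/cacazz1/johnsons-rule | flow.py | calculate_schedule
-- ===== SOURCE A (Python) =====
-- def calculate_schedule(processing_times, sequence):
--     n = len(sequence)
--     start_m1 = [0]*n
--     finish_m1 = [0]*n
--     start_m2 = [0]*n
--     finish_m2 = [0]*n
--     for i, idx in enumerate(sequence):
--         p1, p2 = processing_times[idx]
--         start_m1[i] = finish_m1[i-1] if i > 0 else 0
--         finish_m1[i] = start_m1[i] + p1
--         start_m2[i] = max(finish_m2[i-1] if i > 0 else 0, finish_m1[i])
--         finish_m2[i] = start_m2[i] + p2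
--     return start_m1, finish_m1, start_m2, finish_m2
-- ===== SOURCE B (Python) =====
-- def calculate_schedule(processing_times, sequence):
--     # Phase 1: gather pairs in access order, then machine-1 times as a prefix-sum table.
--     pairs = [processing_times[idx] for idx in sequence]
--     acc = [0]
--     for p in pairs:
--         acc.append(acc[-1] + p[0])
--     start_m1, finish_m1 = acc[:-1], acc[1:]
--     # Phase 2: separate pass for machine 2 with a running finish time.
--     start_m2, finish_m2 = [], []
--     f2 = 0
--     for f1, p in zip(finish_m1, pairs):
--         s2 = f2 if f2 > f1 else f1
--         f2 = s2 + p[1]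
--         start_m2.append(s2)
--         finish_m2.append(f2)
--     return start_m1, finish_m1, start_m2, finish_m2
-- ===== Notes on version B (the rewrite author's own statement) =====
-- stated objective: alternative
-- what changed: Replaces the single interleaved index-assignment loop with a prefix-sum table for machine 1 (built once over the gathered pairs) followed by a separate second pass keeping only a running machine-2 finish time.
import Mathlib
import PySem

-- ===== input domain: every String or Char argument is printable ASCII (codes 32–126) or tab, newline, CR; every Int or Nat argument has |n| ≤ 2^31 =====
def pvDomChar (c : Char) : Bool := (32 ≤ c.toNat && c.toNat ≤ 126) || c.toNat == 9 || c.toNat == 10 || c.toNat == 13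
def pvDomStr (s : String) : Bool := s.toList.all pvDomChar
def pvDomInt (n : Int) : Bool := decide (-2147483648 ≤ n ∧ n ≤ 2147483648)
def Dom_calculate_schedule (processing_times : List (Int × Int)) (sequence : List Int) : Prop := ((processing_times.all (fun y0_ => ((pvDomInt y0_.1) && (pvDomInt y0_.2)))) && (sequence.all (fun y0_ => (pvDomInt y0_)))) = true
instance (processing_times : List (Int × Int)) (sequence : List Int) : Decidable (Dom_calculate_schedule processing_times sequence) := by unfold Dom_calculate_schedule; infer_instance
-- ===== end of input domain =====

-- B replaces A's single interleaved loop by a prefix-sum pass for machine 1 plus a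
-- separate running-finish pass for machine 2 (alternative decomposition, same cost).


-- ===== PORT A =====
-- A's loop over enumerate(sequence): state = the four arrays built so far (positions
-- 0..i-1 are filled; trailing zeros of the preallocated Python lists are never read
-- before being assigned, so the filled prefixes are carried).  processing_times[idx]
-- is pyGet? (none = IndexError, excluded by Pre_).
def csA_loop (pt : List (Int × Int)) :
    List Int → Nat → List Int → List Int → List Int → List Int →
    Option (List Int × List Int × List Int × List Int)
  | [], _, s1, f1, s2, f2 => some (s1, f1, s2, f2)
  | idx :: rest, i, s1, f1, s2, f2 =>
    match PySem.List.pyGet? pt idx with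
    | none => none
    | some (p1, p2) =>
      let sm1 := if i > 0 then f1.getD (i-1) 0 else 0   -- finish_m1[i-1] if i > 0 else 0 (index in range)
      let fm1 := sm1 + p1
      let sm2 := max (if i > 0 then f2.getD (i-1) 0 else 0) fm1
      let fm2 := sm2 + p2
      csA_loop pt rest (i+1) (s1 ++ [sm1]) (f1 ++ [fm1]) (s2 ++ [sm2]) (f2 ++ [fm2])

def calculate_schedule (processing_times : List (Int × Int)) (sequence : List Int) : List Int × List Int × List Int × List Int :=
  match csA_loop processing_times sequence 0 [] [] [] [] with
  | some r => r
  | none => ([], [], [], [])   -- IndexError in Python; excluded by Pre_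

-- ===== PORT B =====
-- pairs = [processing_times[idx] for idx in sequence]  (none = IndexError, excluded by Pre_)
def csB_pairs? (pt : List (Int × Int)) : List Int → Option (List (Int × Int))
  | [] => some []
  | idx :: rest =>
    match PySem.List.pyGet? pt idx with
    | none => none
    | some p => (csB_pairs? pt rest).map (p :: ·)

-- acc = [0]; for p in pairs: acc.append(acc[-1] + p[0])   (acc is never empty, so acc[-1] = getLastD)
def csB_acc (pairs : List (Int × Int)) : List Int :=
  pairs.foldl (fun acc p => acc ++ [acc.getLastD 0 + p.1]) [0]

-- second pass: running machine-2 finish time f2 over zip(finish_m1, pairs)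
def csB_loop2 : List (Int × (Int × Int)) → Int → List Int → List Int → List Int × List Int
  | [], _, s2s, f2s => (s2s, f2s)
  | (f1, p) :: rest, f2, s2s, f2s =>
    let s2 := if f2 > f1 then f2 else f1
    let f2' := s2 + p.2
    csB_loop2 rest f2' (s2s ++ [s2]) (f2s ++ [f2'])

def calculate_schedule_alt (processing_times : List (Int × Int)) (sequence : List Int) : List Int × List Int × List Int × List Int :=
  match csB_pairs? processing_times sequence with
  | none => ([], [], [], [])   -- IndexError in Python; excluded by Pre_
  | some pairs =>
    let acc := csB_acc pairs
    let start_m1 := acc.dropLast        -- acc[:-1]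
    let finish_m1 := acc.drop 1         -- acc[1:]
    let (start_m2, finish_m2) := csB_loop2 (finish_m1.zip pairs) 0 [] []
    (start_m1, finish_m1, start_m2, finish_m2)

-- ===== PRECONDITION & SPEC =====
-- Pre_: every index in sequence is a valid Python index into processing_times
-- (otherwise Python A raises IndexError).
def Pre_calculate_schedule (processing_times : List (Int × Int)) (sequence : List Int) : Prop :=
  ∀ idx ∈ sequence, PySem.Raise.InRange processing_times.length idx
instance (processing_times : List (Int × Int)) (sequence : List Int) : Decidable (Pre_calculate_schedule processing_times sequence) := by unfold Pre_calculate_schedule; infer_instance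

def pvWitness_calculate_schedule : (List (Int × Int)) × List Int := ([(3, 2), (1, 4)], [1, 0, -1])

def Spec_calculate_schedule (processing_times : List (Int × Int)) (sequence : List Int) (out : List Int × List Int × List Int × List Int) : Prop := out = calculate_schedule_alt processing_times sequence
instance (processing_times : List (Int × Int)) (sequence : List Int) (out : List Int × List Int × List Int × List Int) : Decidable (Spec_calculate_schedule processing_times sequence out) := by unfold Spec_calculate_schedule; infer_instance

-- ===== CLAIM (what is proved, stated in full; the proofs are below) =====
def Claim_equal_calculate_schedule : Prop := ∀ (processing_times : List (Int × Int)) (sequence : List Int), Dom_calculate_schedule processing_times sequence → Pre_calculate_schedule processing_times sequence → Spec_calculate_schedule processing_times sequence (calculate_schedule processing_times sequence)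

-- ===== LEMMAS AND PROOFS =====

-- reference recursion: per-step schedule values given previous machine finishes a (m1) and b (m2)
def csGo : List (Int × Int) → Int → Int → List Int × List Int × List Int × List Int
  | [], _, _ => ([], [], [], [])
  | (p1, p2) :: rest, a, b =>
    let f1 := a + p1
    let s2 := max b f1
    let f2 := s2 + p2
    let r := csGo rest f1 f2
    (a :: r.1, f1 :: r.2.1, s2 :: r.2.2.1, f2 :: r.2.2.2)

-- machine-1 finish times as a scan
def csScan : List (Int × Int) → Int → List Int
  | [], _ => []
  | p :: rest, a => (a + p.1) :: csScan rest (a + p.1)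

-- machine-2 columns
def csM2 : List (Int × (Int × Int)) → Int → List Int × List Int
  | [], _ => ([], [])
  | (f1, p) :: rest, b =>
    let s2 := if b > f1 then b else f1
    let f2 := s2 + p.2
    let r := csM2 rest f2
    (s2 :: r.1, f2 :: r.2)

theorem csA_loop_eq (pt : List (Int × Int)) (seq : List Int) :
    ∀ (i : Nat) (s1 f1 s2 f2 : List Int), f1.length = i → f2.length = i →
    csA_loop pt seq i s1 f1 s2 f2 =
      (csB_pairs? pt seq).map (fun pairs =>
        let r := csGo pairs (f1.getLastD 0) (f2.getLastD 0)
        (s1 ++ r.1, f1 ++ r.2.1, s2 ++ r.2.2.1, f2 ++ r.2.2.2)) := by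
  induction seq with
  | nil => intro i s1 f1 s2 f2 h1 h2; simp [csA_loop, csB_pairs?, csGo]
  | cons idx rest ih =>
    intro i s1 f1 s2 f2 h1 h2
    simp only [csA_loop, csB_pairs?]
    cases hget : PySem.List.pyGet? pt idx with
    | none => simp
    | some p =>
      obtain ⟨p1, p2⟩ := p
      have hl : ∀ (l : List Int), l.length = i → (if i > 0 then l.getD (i-1) 0 else 0) = l.getLastD 0 := by
        intro l hl'
        by_cases hi : i > 0
        · simp only [if_pos hi]
          cases l with
          | nil => simp at hl'; omega
          | cons x xs =>
            rw [List.getD_eq_getElem?_getD, List.getLastD_eq_getLast?, List.getLast?_eq_getElem?]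
            rw [show i - 1 = (x :: xs).length - 1 from by rw [hl']]
        · have : i = 0 := by omega
          subst this
          cases l with
          | nil => simp
          | cons x xs => simp at hl'
      rw [hl f1 h1, hl f2 h2]
      dsimp only
      rw [ih (i+1) (s1 ++ [_]) (f1 ++ [_]) (s2 ++ [_]) (f2 ++ [_]) (by simp [h1]) (by simp [h2])]
      cases hrest : csB_pairs? pt rest with
      | none => simp
      | some pairs =>
        simp only [Option.map_some]
        congr 1
        simp [csGo, List.append_assoc]

theorem csB_foldl_acc (pairs : List (Int × Int)) :
    ∀ (pre : List Int) (a : Int),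
      pairs.foldl (fun acc p => acc ++ [acc.getLastD 0 + p.1]) (pre ++ [a]) =
        (pre ++ [a]) ++ csScan pairs a := by
  induction pairs with
  | nil => intro pre a; simp [csScan]
  | cons p rest ih =>
    intro pre a
    simp only [List.foldl_cons, List.getLastD_concat, csScan]
    rw [ih (pre ++ [a]) (a + p.1)]
    simp

theorem csB_loop2_eq (zs : List (Int × (Int × Int))) :
    ∀ (b : Int) (s2s f2s : List Int),
      csB_loop2 zs b s2s f2s = (s2s ++ (csM2 zs b).1, f2s ++ (csM2 zs b).2) := by
  induction zs with
  | nil => intro b s2s f2s; simp [csB_loop2, csM2]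
  | cons z rest ih =>
    intro b s2s f2s
    obtain ⟨f1, p⟩ := z
    simp only [csB_loop2, csM2]
    rw [ih]
    simp

theorem csGo_eq_parts (pairs : List (Int × Int)) :
    ∀ (a b : Int),
      csGo pairs a b =
        ((a :: csScan pairs a).dropLast, csScan pairs a,
         (csM2 ((csScan pairs a).zip pairs) b).1, (csM2 ((csScan pairs a).zip pairs) b).2) := by
  induction pairs with
  | nil => intro a b; simp [csGo, csScan, csM2]
  | cons p rest ih =>
    intro a b
    obtain ⟨p1, p2⟩ := p
    have hmax : max b (a + p1) = if b > a + p1 then b else (a + p1) := by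
      rcases le_or_gt b (a + p1) with h | h
      · rw [max_eq_right h, if_neg (by omega)]
      · rw [max_eq_left (le_of_lt h), if_pos h]
    simp only [csGo, csScan, List.zip_cons_cons, csM2, ih, hmax, Prod.mk.injEq]
    exact ⟨(List.dropLast_cons_of_ne_nil (by simp)).symm, trivial⟩

theorem calculate_schedule_spec : Claim_equal_calculate_schedule := by
  intro pt seq _ _
  unfold Spec_calculate_schedule calculate_schedule calculate_schedule_alt
  rw [csA_loop_eq pt seq 0 [] [] [] [] rfl rfl]
  cases h : csB_pairs? pt seq with
  | none => simp
  | some pairs =>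
    simp only [Option.map_some]
    rw [csGo_eq_parts]
    have hacc : csB_acc pairs = 0 :: csScan pairs 0 := by
      have := csB_foldl_acc pairs [] 0
      simpa [csB_acc] using this
    rw [hacc]
    rw [csB_loop2_eq]
    simp
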